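-- pv_equiv track=rewrite | github.com/h1ghw8/algosy | algosy6.py | valid_arrangement
-- ===== SOURCE A (Python) =====
-- from collections import defaultdict, deque
-- from typing import List
--
-- def valid_arrangement(pairs: List[List[int]]) -> List[List[int]]:
--     graph = defaultdict(list)
--     degree = defaultdict(int)
--
--     for u, v in pairs:
--         graph[u].append(v)
--         degree[u] += 1
--         degree[v] -= 1
--
--     start = pairs[0][0]
--     for node, deg in degree.items():
--         if deg == 1:
--             start = node
--             break
--
--     path = []
--     stack = [start]
--
--     while stack:
--         node = stack[-1]
--         if graph[node]:
--             next_node = graph[node].pop()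
--             stack.append(next_node)
--         else:
--             path.append(node)
--             stack.pop()
--
--     path.reverse()
--
--     result = []
--     for i in range(len(path) - 1):
--         result.append([path[i], path[i + 1]])
--
--     return result
-- ===== SOURCE B (Python) =====
-- from typing import List
--
-- def valid_arrangement(pairs: List[List[int]]) -> List[List[int]]:
--     # Recursive Hierholzer (dfs) instead of A's explicit-stack loop; plain dicts
--     # built with get() instead of defaultdicts; consecutive pairs via zip.
--     graph = {}
--     for u, v in pairs:
--         graph[u] = graph.get(u, []) + [v]
--
--     degree = {}
--     for u, v in pairs:
--         degree[u] = degree.get(u, 0) + 1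
--         degree[v] = degree.get(v, 0) - 1
--
--     start = next((node for node, deg in degree.items() if deg == 1), pairs[0][0])
--
--     path = []
--
--     def dfs(u):
--         while graph.get(u):
--             dfs(graph[u].pop())
--         path.append(u)
--
--     dfs(start)
--     path.reverse()
--
--     return [[a, b] for a, b in zip(path, path[1:])]
-- ===== Notes on version B (the rewrite author's own statement) =====
-- stated objective: alternative
-- what changed: The explicit-stack Hierholzer loop is replaced by a recursive dfs helper (post-order recursion instead of A's while-stack), the defaultdicts by plain dicts built with get(), and the index-loop pairing by zip(path, path[1:]).
import Mathlib
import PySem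

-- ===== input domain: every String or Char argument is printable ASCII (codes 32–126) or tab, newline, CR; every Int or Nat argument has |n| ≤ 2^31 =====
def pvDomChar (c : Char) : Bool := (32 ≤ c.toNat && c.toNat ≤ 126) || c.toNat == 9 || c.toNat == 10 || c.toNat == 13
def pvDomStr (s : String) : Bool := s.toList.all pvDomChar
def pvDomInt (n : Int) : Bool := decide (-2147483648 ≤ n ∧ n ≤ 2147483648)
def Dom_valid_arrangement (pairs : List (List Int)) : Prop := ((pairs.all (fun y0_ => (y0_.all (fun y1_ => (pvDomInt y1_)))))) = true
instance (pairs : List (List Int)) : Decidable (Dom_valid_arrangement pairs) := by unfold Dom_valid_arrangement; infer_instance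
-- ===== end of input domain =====

-- B replaces A's explicit-stack Hierholzer loop by a recursive dfs (and builds graph/degree
-- in two plain-dict passes, pairs the path with zip); same cost, different decomposition.

-- Shared helpers the two ports need for termination (total edge weight of the adjacency dict,
-- and nodup-keys preservation through a build loop).
def pvWeight (g : PySem.Dict Int (List Int)) : Nat :=
  (g.items.map (fun p => p.2.length)).sum

theorem pvSumMapReplace : ∀ (its : List (Int × List Int)) (k : Int) (l : List Int),
    (its.map Prod.fst).Nodup → (k, l) ∈ its → l ≠ [] →
    ((its.map (fun p => if p.1 == k then (k, l.dropLast) else p)).map (fun p => p.2.length)).sum + 1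
      = (its.map (fun p => p.2.length)).sum := by
  intro its k l hnd hmem hne
  induction its with
  | nil => cases hmem
  | cons a t ih =>
    simp only [List.map_cons, List.nodup_cons] at hnd ⊢
    rcases List.mem_cons.mp hmem with h | h
    · subst h
      have htail : ∀ p ∈ t, (p.1 == k) = false := by
        intro p hp
        have hpk : p.1 ≠ k := by
          intro he; exact hnd.1 (he ▸ (List.mem_map.mpr ⟨p, hp, rfl⟩))
        simpa using hpk
      have hmapt : List.map (fun p => if (p.1 == k) = true then (k, l.dropLast) else p) t = t := by
        have := List.map_congr_left (l := t)
          (f := fun p => if (p.1 == k) = true then (k, l.dropLast) else p) (g := id)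
          (fun p hp => by simp [htail p hp])
        simpa using this
      simp only [BEq.rfl, if_true, hmapt, List.sum_cons]
      have hlen : l.dropLast.length + 1 = l.length := by
        have h1 : l.dropLast.length = l.length - 1 := List.length_dropLast (xs := l)
        have hl : 0 < l.length := List.length_pos_of_ne_nil hne
        omega
      omega
    · have hkmem : k ∈ t.map Prod.fst := List.mem_map.mpr ⟨(k, l), h, rfl⟩
      have hak : (a.1 == k) = false := by
        have : a.1 ≠ k := fun he => hnd.1 (he ▸ hkmem)
        simpa using this
      simp only [hak, Bool.false_eq_true, if_false, List.sum_cons]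
      have := ih hnd.2 h
      omega

theorem pvWeight_insert_dropLast (g : PySem.Dict Int (List Int)) (k : Int) (l : List Int)
    (hnd : g.keys.Nodup) (hget : g.get? k = some l) (hne : l ≠ []) :
    pvWeight (g.insert k l.dropLast) + 1 = pvWeight g := by
  have hc : g.contains k = true := by
    rw [PySem.Dict.contains_eq_isSome_get?, hget]; rfl
  have hmem : (k, l) ∈ g.items := PySem.Dict.mem_items_of_get?_eq_some g hget
  unfold pvWeight
  rw [PySem.Dict.items_insert_of_contains g l.dropLast hc]
  exact pvSumMapReplace g.items k l hnd hmem hne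

theorem pvFoldNodup {σ : Type} (f : PySem.Dict Int σ → List Int → PySem.Dict Int σ)
    (hstep : ∀ (d : PySem.Dict Int σ) (p : List Int), d.keys.Nodup → (f d p).keys.Nodup) :
    ∀ (l : List (List Int)) (d : PySem.Dict Int σ), d.keys.Nodup → (l.foldl f d).keys.Nodup := by
  intro l
  induction l with
  | nil => intro d h; exact h
  | cons p t ih => intro d h; exact ih (f d p) (hstep d p h)

-- ===== PORT A =====
-- graph[u].append(v) on a defaultdict = modify u [] (· ++ [v]); degree updates likewise.
def pvStepG (d : PySem.Dict Int (List Int)) (p : List Int) : PySem.Dict Int (List Int) :=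
  match p with
  | [u, v] => d.modify u [] (· ++ [v])
  | _ => d          -- unreachable under Pre_ (rows have length 2; Python unpacking raises otherwise)

def pvStepD (d : PySem.Dict Int Int) (p : List Int) : PySem.Dict Int Int :=
  match p with
  | [u, v] => (d.modify u 0 (· + 1)).modify v 0 (· - 1)
  | _ => d

theorem pvStepG_nodup (d : PySem.Dict Int (List Int)) (p : List Int)
    (h : d.keys.Nodup) : (pvStepG d p).keys.Nodup := by
  unfold pvStepG
  match p with
  | [u, v] =>
    have := PySem.Dict.keys_modify d u [] (· ++ [v])
    have h2 := PySem.Dict.nodup_keys_insert d u ((d.getD u []) ++ [v]) h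
    simpa [this] using h2
  | [] => exact h
  | [_] => exact h
  | _ :: _ :: _ :: _ => exact h

theorem pvBuildNodupA (pairs : List (List Int)) :
    (pairs.foldl (fun st p => (pvStepG st.1 p, pvStepD st.2 p))
      (PySem.Dict.empty, PySem.Dict.empty)).1.keys.Nodup := by
  rw [PySem.List.foldl_prod_mk]
  exact pvFoldNodup pvStepG pvStepG_nodup pairs PySem.Dict.empty PySem.Dict.nodup_keys_empty

-- 'for node, deg in degree.items(): if deg == 1: start = node; break'
def pvFindStart : List (Int × Int) → Int → Int
  | [], dflt => dflt
  | (node, deg) :: t, dflt => if deg == 1 then node else pvFindStart t dflt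

-- the while-stack Hierholzer loop of A (hnd is a totality artifact: the edge weight
-- used as termination measure only decreases on dicts with nodup keys)
def pvLoopA (g : PySem.Dict Int (List Int)) (stack path : List Int) (hnd : g.keys.Nodup) :
    PySem.Dict Int (List Int) × List Int :=
  if hs : stack = [] then (g, path)
  else
    if h2 : g.getD (stack.getLast hs) [] = [] then
      pvLoopA g stack.dropLast (path ++ [stack.getLast hs]) hnd
    else
      pvLoopA (g.insert (stack.getLast hs) (g.getD (stack.getLast hs) []).dropLast)
        (stack ++ [(g.getD (stack.getLast hs) []).getLast h2]) path
        (PySem.Dict.nodup_keys_insert g (stack.getLast hs) (g.getD (stack.getLast hs) []).dropLast hnd)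
termination_by 2 * pvWeight g + stack.length
decreasing_by
  · have : 0 < stack.length := List.length_pos_of_ne_nil hs
    simp [List.length_dropLast]; omega
  · have hget : g.get? (stack.getLast hs) = some (g.getD (stack.getLast hs) []) := by
      cases hg : g.get? (stack.getLast hs) with
      | none => exact absurd (PySem.Dict.getD_of_get?_eq_none g [] hg) h2
      | some l => rw [PySem.Dict.getD_eq_get?_getD, hg]; rfl
    have hw := pvWeight_insert_dropLast g (stack.getLast hs) (g.getD (stack.getLast hs) []) hnd hget h2
    simp only [List.length_append, List.length_cons, List.length_nil]
    omega

def valid_arrangement (pairs : List (List Int)) : List (List Int) :=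
  let gd := pairs.foldl (fun st p => (pvStepG st.1 p, pvStepD st.2 p))
              (PySem.Dict.empty, PySem.Dict.empty)
  let start := pvFindStart gd.2.items (PySem.List.pyGetD (PySem.List.pyGetD pairs 0 []) 0 0)
  let r := pvLoopA gd.1 [start] [] (pvBuildNodupA pairs)
  let path := r.2.reverse
  (PySem.List.pyRange 0 ((path.length : Int) - 1)).foldl
    (fun acc i => acc ++ [[PySem.List.pyGetD path i 0, PySem.List.pyGetD path (i + 1) 0]]) []

-- ===== PORT B =====
-- graph[u] = graph.get(u, []) + [v]
def pvStepGB (d : PySem.Dict Int (List Int)) (p : List Int) : PySem.Dict Int (List Int) :=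
  match p with
  | [u, v] => d.insert u (d.getD u [] ++ [v])
  | _ => d

def pvStepDB (d : PySem.Dict Int Int) (p : List Int) : PySem.Dict Int Int :=
  match p with
  | [u, v] => (d.insert u (d.getD u 0 + 1)).insert v ((d.insert u (d.getD u 0 + 1)).getD v 0 - 1)
  | _ => d

-- recursive Hierholzer: dfs(u): while graph.get(u): dfs(graph[u].pop()); path.append(u).
-- The subtype carries the two facts the recursion itself needs: the edge weight never
-- grows and keys stay nodup.
def pvDfs (g : PySem.Dict Int (List Int)) (u : Int) (path : List Int) (hnd : g.keys.Nodup) :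
    {r : PySem.Dict Int (List Int) × List Int // pvWeight r.1 ≤ pvWeight g ∧ r.1.keys.Nodup} :=
  if h2 : g.getD u [] = [] then ⟨(g, path ++ [u]), le_refl _, hnd⟩
  else
    have hget : g.get? u = some (g.getD u []) := by
      cases hg : g.get? u with
      | none => exact absurd (PySem.Dict.getD_of_get?_eq_none g [] hg) h2
      | some l => rw [PySem.Dict.getD_eq_get?_getD, hg]; rfl
    have hw : pvWeight (g.insert u (g.getD u []).dropLast) + 1 = pvWeight g :=
      pvWeight_insert_dropLast g u (g.getD u []) hnd hget h2
    let r1 := pvDfs (g.insert u (g.getD u []).dropLast) ((g.getD u []).getLast h2) path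
      (PySem.Dict.nodup_keys_insert g u (g.getD u []).dropLast hnd)
    let r2 := pvDfs r1.1.1 u r1.1.2 r1.2.2
    ⟨r2.1, ⟨le_trans r2.2.1 (le_trans r1.2.1 (Nat.le.intro hw)), r2.2.2⟩⟩
termination_by pvWeight g
decreasing_by
  · exact hw ▸ Nat.lt_add_one (pvWeight (g.insert u (g.getD u []).dropLast))
  · exact lt_of_le_of_lt r1.2.1 (hw ▸ Nat.lt_add_one (pvWeight (g.insert u (g.getD u []).dropLast)))

def valid_arrangement_alt (pairs : List (List Int)) : List (List Int) :=
  let graph := pairs.foldl pvStepGB PySem.Dict.empty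
  let degree := pairs.foldl pvStepDB PySem.Dict.empty
  let start := ((degree.items.find? (fun p => p.2 == 1)).map Prod.fst).getD
    (PySem.List.pyGetD (PySem.List.pyGetD pairs 0 []) 0 0)
  let r := pvDfs graph start []
    (pvFoldNodup pvStepGB
      (fun d p h => by
        unfold pvStepGB
        match p with
        | [u, v] => exact PySem.Dict.nodup_keys_insert d u (d.getD u [] ++ [v]) h
        | [] => exact h
        | [_] => exact h
        | _ :: _ :: _ :: _ => exact h)
      pairs PySem.Dict.empty PySem.Dict.nodup_keys_empty)
  let path := r.1.2.reverse
  (path.zip (PySem.List.slice path (some 1))).map (fun p => [p.1, p.2])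

-- ===== PRECONDITION & SPEC =====
-- Pre_ excludes exactly the inputs where Python A raises: the empty list (pairs[0][0] is an
-- IndexError) and rows whose length is not 2 ('for u, v in pairs' unpacking raises ValueError).
def Pre_valid_arrangement (pairs : List (List Int)) : Prop :=
  pairs ≠ [] ∧ ∀ p ∈ pairs, p.length = 2
instance (pairs : List (List Int)) : Decidable (Pre_valid_arrangement pairs) := by
  unfold Pre_valid_arrangement; infer_instance

def pvWitness_valid_arrangement : List (List Int) := [[0, 1]]

def Spec_valid_arrangement (pairs : List (List Int)) (out : List (List Int)) : Prop :=
  out = valid_arrangement_alt pairs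
instance (pairs : List (List Int)) (out : List (List Int)) : Decidable (Spec_valid_arrangement pairs out) := by
  unfold Spec_valid_arrangement; infer_instance

-- ===== CLAIM (what is proved, stated in full; the proofs are below) =====
def Claim_equal_valid_arrangement : Prop :=
  ∀ (pairs : List (List Int)), Dom_valid_arrangement pairs → Pre_valid_arrangement pairs →
    Spec_valid_arrangement pairs (valid_arrangement pairs)

-- ===== LEMMAS AND PROOFS =====

theorem pvGetD_len_le_weight (g : PySem.Dict Int (List Int)) (u : Int) :
    (g.getD u []).length ≤ pvWeight g := by
  cases hget : g.get? u with
  | none => simp [PySem.Dict.getD_of_get?_eq_none g [] hget]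
  | some l =>
    rw [PySem.Dict.getD_eq_get?_getD, hget]
    have hmem : (u, l) ∈ g.items := PySem.Dict.mem_items_of_get?_eq_some g hget
    have : l.length ∈ g.items.map (fun p => p.2.length) :=
      List.mem_map.mpr ⟨(u, l), hmem, rfl⟩
    exact List.single_le_sum (fun x _ => Nat.zero_le x) _ this


theorem pvFindStart_eq_find? : ∀ (l : List (Int × Int)) (dflt : Int),
    pvFindStart l dflt = ((l.find? (fun p => p.2 == 1)).map Prod.fst).getD dflt := by
  intro l dflt
  induction l with
  | nil => rfl
  | cons a t ih =>
    rcases a with ⟨node, deg⟩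
    by_cases h : deg = 1
    · simp [pvFindStart, h]
    · simp [pvFindStart, h, ih]

-- unfolding equations and congruence for the two traversals
theorem pvLoopA_nil (g : PySem.Dict Int (List Int)) (p : List Int) (hnd : g.keys.Nodup) :
    pvLoopA g [] p hnd = (g, p) := by
  rw [pvLoopA]
  simp

theorem pvLoopA_congr {g g' : PySem.Dict Int (List Int)} {s s' p p' : List Int}
    (hg : g = g') (hs : s = s') (hp : p = p') (hnd : g.keys.Nodup) (hnd' : g'.keys.Nodup) :
    pvLoopA g s p hnd = pvLoopA g' s' p' hnd' := by
  subst hg; subst hs; subst hp; rfl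

theorem pvLoopA_pop (g : PySem.Dict Int (List Int)) (s : List Int) (u : Int) (p : List Int)
    (hnd : g.keys.Nodup) (h2 : g.getD u [] = []) :
    pvLoopA g (s ++ [u]) p hnd = pvLoopA g s (p ++ [u]) hnd := by
  have hne : ¬ s ++ [u] = [] := by simp
  have hlast : (s ++ [u]).getLast hne = u := by simp
  conv_lhs => rw [pvLoopA]
  rw [dif_neg hne]
  simp only [hlast, List.dropLast_concat]
  rw [dif_pos h2]

theorem pvLoopA_push (g : PySem.Dict Int (List Int)) (s : List Int) (u : Int) (p : List Int)
    (hnd : g.keys.Nodup) (h2 : ¬ g.getD u [] = []) :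
    pvLoopA g (s ++ [u]) p hnd
      = pvLoopA (g.insert u (g.getD u []).dropLast) ((s ++ [u]) ++ [(g.getD u []).getLast h2]) p
          (PySem.Dict.nodup_keys_insert g u (g.getD u []).dropLast hnd) := by
  have hne : ¬ s ++ [u] = [] := by simp
  have hlast : (s ++ [u]).getLast hne = u := by simp
  conv_lhs => rw [pvLoopA]
  rw [dif_neg hne]
  simp only [hlast]
  rw [dif_neg h2]

theorem pvDfs_empty (g : PySem.Dict Int (List Int)) (u : Int) (p : List Int)
    (hnd : g.keys.Nodup) (h2 : g.getD u [] = []) :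
    (pvDfs g u p hnd).1 = (g, p ++ [u]) := by
  conv_lhs => rw [pvDfs]
  rw [dif_pos h2]

theorem pvDfs_step (g : PySem.Dict Int (List Int)) (u : Int) (p : List Int)
    (hnd : g.keys.Nodup) (h2 : ¬ g.getD u [] = []) :
    (pvDfs g u p hnd).1 =
      (pvDfs (pvDfs (g.insert u (g.getD u []).dropLast) ((g.getD u []).getLast h2) p
          (PySem.Dict.nodup_keys_insert g u (g.getD u []).dropLast hnd)).1.1 u
        (pvDfs (g.insert u (g.getD u []).dropLast) ((g.getD u []).getLast h2) p
          (PySem.Dict.nodup_keys_insert g u (g.getD u []).dropLast hnd)).1.2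
        (pvDfs (g.insert u (g.getD u []).dropLast) ((g.getD u []).getLast h2) p
          (PySem.Dict.nodup_keys_insert g u (g.getD u []).dropLast hnd)).2.2).1 := by
  conv_lhs => rw [pvDfs]
  rw [dif_neg h2]

theorem pvGetD_some (g : PySem.Dict Int (List Int)) (u : Int) (h2 : ¬ g.getD u [] = []) :
    g.get? u = some (g.getD u []) := by
  cases hg : g.get? u with
  | none => exact absurd (PySem.Dict.getD_of_get?_eq_none g [] hg) h2
  | some l => rw [PySem.Dict.getD_eq_get?_getD, hg]; rfl

-- the explicit-stack loop performs, per top element, exactly one recursive dfs call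
theorem pvLoop_eq_dfs : ∀ (n : Nat) (g : PySem.Dict Int (List Int)) (hnd : g.keys.Nodup),
    pvWeight g ≤ n → ∀ (u : Int) (s p : List Int),
    pvLoopA g (s ++ [u]) p hnd
      = pvLoopA (pvDfs g u p hnd).1.1 s (pvDfs g u p hnd).1.2 (pvDfs g u p hnd).2.2 := by
  intro n
  induction n with
  | zero =>
    intro g hnd hw u s p
    have h2 : g.getD u [] = [] := by
      by_contra h2
      have h3 := pvGetD_len_le_weight g u
      have h4 : 0 < (g.getD u []).length := List.length_pos_of_ne_nil h2
      omega
    rw [pvLoopA_pop g s u p hnd h2]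
    exact pvLoopA_congr (congrArg Prod.fst (pvDfs_empty g u p hnd h2)).symm rfl
      (congrArg Prod.snd (pvDfs_empty g u p hnd h2)).symm hnd _
  | succ n ih =>
    intro g hnd hw u s p
    by_cases h2 : g.getD u [] = []
    · rw [pvLoopA_pop g s u p hnd h2]
      exact pvLoopA_congr (congrArg Prod.fst (pvDfs_empty g u p hnd h2)).symm rfl
        (congrArg Prod.snd (pvDfs_empty g u p hnd h2)).symm hnd _
    · rw [pvLoopA_push g s u p hnd h2]
      have hw1 : pvWeight (g.insert u (g.getD u []).dropLast) + 1 = pvWeight g :=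
        pvWeight_insert_dropLast g u (g.getD u []) hnd (pvGetD_some g u h2) h2
      have hle1 : pvWeight (g.insert u (g.getD u []).dropLast) ≤ n := by omega
      rw [ih (g.insert u (g.getD u []).dropLast)
        (PySem.Dict.nodup_keys_insert g u (g.getD u []).dropLast hnd) hle1
        ((g.getD u []).getLast h2) (s ++ [u]) p]
      have hle2 : pvWeight (pvDfs (g.insert u (g.getD u []).dropLast) ((g.getD u []).getLast h2) p
          (PySem.Dict.nodup_keys_insert g u (g.getD u []).dropLast hnd)).1.1 ≤ n :=
        le_trans (pvDfs (g.insert u (g.getD u []).dropLast) ((g.getD u []).getLast h2) p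
          (PySem.Dict.nodup_keys_insert g u (g.getD u []).dropLast hnd)).2.1 hle1
      rw [ih _ _ hle2 u s _]
      exact pvLoopA_congr (congrArg Prod.fst (pvDfs_step g u p hnd h2)).symm rfl
        (congrArg Prod.snd (pvDfs_step g u p hnd h2)).symm _ _

-- a single-vertex stack runs exactly one dfs
theorem pvLoopA_singleton (g g' : PySem.Dict Int (List Int)) (u u' : Int)
    (hg : g = g') (hu : u = u') (hnd : g.keys.Nodup) (hnd' : g'.keys.Nodup) :
    (pvLoopA g [u] [] hnd).2 = (pvDfs g' u' [] hnd').1.2 := by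
  subst hg; subst hu
  have h := pvLoop_eq_dfs (pvWeight g) g hnd (le_refl _) u [] []
  simp only [List.nil_append] at h
  rw [h, pvLoopA_nil]

theorem pvZipRange : ∀ (l : List Int),
    (List.range (l.length - 1)).map (fun k => [l.getD k 0, l.getD (k + 1) 0])
      = (l.zip (l.drop 1)).map (fun p => [p.1, p.2]) := by
  intro l
  induction l with
  | nil => rfl
  | cons x t ih =>
    cases t with
    | nil => rfl
    | cons y t' =>
      simp only [List.length_cons, Nat.add_sub_cancel] at ih ⊢
      rw [List.range_succ_eq_map, List.map_cons, List.map_map]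
      have hstep : ((fun k => [(x :: y :: t').getD k 0, (x :: y :: t').getD (k + 1) 0]) ∘ Nat.succ)
          = fun k => [(y :: t').getD k 0, (y :: t').getD (k + 1) 0] := by
        funext k
        simp
      rw [hstep, ih]
      simp [List.getD]

-- A's index-loop pairing equals B's zip pairing, for any path
theorem pvPairing (path : List Int) :
    (PySem.List.pyRange 0 ((path.length : Int) - 1)).foldl
        (fun acc i => acc ++ [[PySem.List.pyGetD path i 0, PySem.List.pyGetD path (i + 1) 0]]) []
      = (path.zip (PySem.List.slice path (some 1))).map (fun p => [p.1, p.2]) := by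
  rw [PySem.List.slice_from path (by norm_num : (0:Int) ≤ 1)]
  cases hp : path with
  | nil => rfl
  | cons x t =>
    have hlen : ((x :: t).length : Int) - 1 = ((t.length : Nat) : Int) := by
      simp
    rw [hlen, PySem.List.pyRange_zero_natCast, PySem.List.foldl_append_singleton_eq_map
      (f := fun i => [PySem.List.pyGetD (x :: t) i 0, PySem.List.pyGetD (x :: t) (i + 1) 0])]
    rw [List.map_map, List.nil_append]
    have hfun : ((fun i => [PySem.List.pyGetD (x :: t) i 0, PySem.List.pyGetD (x :: t) (i + 1) 0])
        ∘ fun k : Nat => (k : Int)) = fun k : Nat => [(x :: t).getD k 0, (x :: t).getD (k + 1) 0] := by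
      funext k
      have h1 : ((k : Int) + 1) = ((k + 1 : Nat) : Int) := by push_cast; ring
      simp only [Function.comp_apply]
      rw [h1, PySem.List.pyGetD_natCast, PySem.List.pyGetD_natCast]
    rw [hfun]
    exact pvZipRange (x :: t)

-- ===== VERDICT (by name: the statement is the Claim_ definition above) =====
theorem valid_arrangement_spec : Claim_equal_valid_arrangement := by
  intro pairs _ _
  show valid_arrangement pairs = valid_arrangement_alt pairs
  simp only [valid_arrangement, valid_arrangement_alt]
  rw [pvPairing]
  have hg : (pairs.foldl (fun st p => (pvStepG st.1 p, pvStepD st.2 p))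
      (PySem.Dict.empty, PySem.Dict.empty)).1 = pairs.foldl pvStepGB PySem.Dict.empty := by
    rw [PySem.List.foldl_prod_mk]
    rfl
  have hd : (pairs.foldl (fun st p => (pvStepG st.1 p, pvStepD st.2 p))
      (PySem.Dict.empty, PySem.Dict.empty)).2 = pairs.foldl pvStepDB PySem.Dict.empty := by
    rw [PySem.List.foldl_prod_mk]
    rfl
  have hs : pvFindStart (pairs.foldl (fun st p => (pvStepG st.1 p, pvStepD st.2 p))
        (PySem.Dict.empty, PySem.Dict.empty)).2.items
        (PySem.List.pyGetD (PySem.List.pyGetD pairs 0 []) 0 0)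
      = (((pairs.foldl pvStepDB PySem.Dict.empty).items.find? (fun p => p.2 == 1)).map Prod.fst).getD
        (PySem.List.pyGetD (PySem.List.pyGetD pairs 0 []) 0 0) := by
    rw [pvFindStart_eq_find?, hd]
  rw [pvLoopA_singleton _ _ _ _ hg (hs) (pvBuildNodupA pairs) _]
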